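-- pv_equiv track=rewrite | github.com/sch246/s3_mcpack_maker | s3_mcpack.py | partstrhead
-- ===== SOURCE A (Python) =====
-- def re_empty(list):
--     list2 = []
--     for str in list:
--         if str != '':
--             list2.append(str)
--     return list2
--
-- def partstrhead(str,count):
--     value = ['']
--     for char in str:
--         if char == ' ' and len(value)<=count:
--             value.append('')
--         else:
--             value[-1] += char
--     return re_empty(value)
-- ===== SOURCE B (Python) =====
-- def partstrhead(str, count):
--     return [p for p in str.split(' ', max(count, 0)) if p != '']
-- ===== Notes on version B (the rewrite author's own statement) =====
-- stated objective: faster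
-- what changed: Replaces the char-by-char accumulator loop (with quadratic repeated string concatenation) plus the separate re_empty filtering pass with a single limited str.split(' ', max(count,0)) followed by a comprehension dropping empty parts.
import Mathlib
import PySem

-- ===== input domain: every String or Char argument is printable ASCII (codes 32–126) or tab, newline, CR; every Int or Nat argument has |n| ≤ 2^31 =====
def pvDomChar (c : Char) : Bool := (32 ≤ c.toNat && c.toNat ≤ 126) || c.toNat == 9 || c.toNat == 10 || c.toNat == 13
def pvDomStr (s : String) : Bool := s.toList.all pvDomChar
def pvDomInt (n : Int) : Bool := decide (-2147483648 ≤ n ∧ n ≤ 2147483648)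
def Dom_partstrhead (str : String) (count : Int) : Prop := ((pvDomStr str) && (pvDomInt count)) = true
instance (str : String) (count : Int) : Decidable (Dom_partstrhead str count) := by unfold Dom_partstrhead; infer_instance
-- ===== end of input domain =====

-- B folds A's char-by-char accumulator loop plus the separate re_empty pass into one limited split and a filter (idiomatic rewrite, same behaviour).

-- ===== PORT A =====
-- re_empty(list): append each non-empty string
def re_empty (list : List String) : List String :=
  list.foldl (fun list2 s => if s ≠ "" then list2 ++ [s] else list2) []

-- value starts as [''] and never becomes empty, so value[-1] is its last element (getLastD "" is exact here)
def partstrhead (str : String) (count : Int) : List String :=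
  let value := str.toList.foldl
    (fun value char =>
      if char = ' ' ∧ (value.length : Int) ≤ count then value ++ [""]
      else value.dropLast ++ [value.getLastD "" ++ char.toString])
    [""]
  re_empty value

-- ===== PORT B =====
-- str.split(' ', max(count, 0)) → PySem.Str.splitMax?; the sep is the literal " " ≠ "", so the
-- option is always some and .getD [] only totalizes.
def partstrhead_alt (str : String) (count : Int) : List String :=
  ((PySem.Str.splitMax? str " " (max count 0)).getD []).filter (fun p => p ≠ "")

-- ===== PRECONDITION & SPEC =====
def Spec_partstrhead (str : String) (count : Int) (out : List String) : Prop := out = partstrhead_alt str count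
instance (str : String) (count : Int) (out : List String) : Decidable (Spec_partstrhead str count out) := by unfold Spec_partstrhead; infer_instance

-- ===== CLAIM (what is proved, stated in full; the proofs are below) =====
def Claim_equal_partstrhead : Prop := ∀ (str : String) (count : Int), Dom_partstrhead str count → Spec_partstrhead str count (partstrhead str count)

-- ===== LEMMAS AND PROOFS =====

-- simple reference splitter: at most m splits on ' ', left to right
def consHead (p : List Char) : List (List Char) → List (List Char)
  | [] => [p]
  | h :: t => (p ++ h) :: t

def ssplit : List Char → Nat → List (List Char)
  | l, 0 => [l]
  | [], _ + 1 => [[]]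
  | c :: rest, m + 1 => if c = ' ' then [] :: ssplit rest m else consHead [c] (ssplit rest (m + 1))

theorem ssplit_ne_nil (l : List Char) (m : Nat) : ssplit l m ≠ [] := by
  induction l generalizing m with
  | nil => cases m <;> simp [ssplit]
  | cons c rest ih =>
    cases m with
    | zero => simp [ssplit]
    | succ m =>
      simp only [ssplit]
      split
      · simp
      · cases h : ssplit rest (m + 1) with
        | nil => exact absurd h (ih _)
        | cons a t => simp [consHead]

theorem consHead_nil (s : List (List Char)) (hs : s ≠ []) : consHead [] s = s := by
  cases s with
  | nil => exact absurd rfl hs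
  | cons h t => simp [consHead]

theorem consHead_consHead (a b : List Char) (s : List (List Char)) :
    consHead a (consHead b s) = consHead (a ++ b) s := by
  cases s <;> simp [consHead]

-- the fuel-based splitter of PySem agrees with ssplit
theorem go_eq_ssplit (l : List Char) (fuel m : Nat) (cur : List Char) (acc : List (List Char))
    (hf : l.length ≤ fuel) :
    PySem.Chars.splitOnMax.go [' '] fuel m l cur acc
      = acc.reverse ++ consHead cur.reverse (ssplit l m) := by
  induction l generalizing fuel m cur acc with
  | nil =>
    cases fuel with
    | zero => cases m <;> simp [PySem.Chars.splitOnMax.go, ssplit, consHead]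
    | succ f => cases m <;> simp [PySem.Chars.splitOnMax.go, ssplit, consHead]
  | cons c rest ih =>
    cases fuel with
    | zero => simp at hf
    | succ f =>
      have hrest : rest.length ≤ f := by simpa using hf
      cases m with
      | zero => simp [PySem.Chars.splitOnMax.go, ssplit, consHead]
      | succ m =>
        by_cases hc : c = ' '
        · subst hc
          have hpre : [' '].isPrefixOf (' ' :: rest) = true := by simp [List.isPrefixOf]
          simp only [PySem.Chars.splitOnMax.go, hpre, if_true, Nat.succ_ne_zero, if_false,
            Nat.add_sub_cancel, List.length_cons, List.drop_succ_cons, List.length_nil,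
            List.drop_zero]
          rw [ih f m [] (cur.reverse :: acc) hrest]
          simp only [List.reverse_nil]
          rw [consHead_nil _ (ssplit_ne_nil _ _)]
          simp [ssplit, consHead]
        · have hpre : [' '].isPrefixOf (c :: rest) = false := by
            simp only [List.isPrefixOf, Bool.and_true, beq_eq_false_iff_ne, ne_eq]
            exact fun h => hc h.symm
          simp only [PySem.Chars.splitOnMax.go, hpre, Nat.succ_ne_zero, if_false,
            Bool.false_eq_true]
          rw [ih f (m + 1) (c :: cur) acc hrest]
          simp [ssplit, hc, consHead_consHead]

-- string-level head-prepend
def consHeadS (p : String) : List String → List String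
  | [] => [p]
  | h :: t => (p ++ h) :: t

theorem consHeadS_map_mk (p : List Char) (s : List (List Char)) :
    (consHead p s).map (fun cs => String.ofList cs)
      = consHeadS (String.ofList p) (s.map (fun cs => String.ofList cs)) := by
  cases s <;> simp [consHead, consHeadS]

theorem consHeadS_consHeadS (a b : String) (s : List String) :
    consHeadS a (consHeadS b s) = consHeadS (a ++ b) s := by
  cases s <;> simp [consHeadS, String.append_assoc]

theorem consHeadS_empty (s : List String) (hs : s ≠ []) : consHeadS "" s = s := by
  cases s with
  | nil => exact absurd rfl hs
  | cons h t => simp [consHeadS]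

theorem dropLast_getLastD (v : List String) (hv : v ≠ []) :
    v.dropLast ++ [v.getLastD ""] = v := by
  induction v using List.reverseRecOn with
  | nil => simp at hv
  | append_singleton xs x ih => simp

-- loop invariant for A's fold: the running value is the consumed prefix split with the remaining
-- budget, glued onto the current last element
theorem foldA_eq (count : Int) (l : List Char) :
    ∀ (v : List String), v ≠ [] →
    l.foldl
      (fun value char =>
        if char = ' ' ∧ (value.length : Int) ≤ count then value ++ [""]
        else value.dropLast ++ [value.getLastD "" ++ char.toString])
      v
    = v.dropLast ++ consHeadS (v.getLastD "")
        ((ssplit l ((count + 1 - v.length).toNat)).map (fun cs => String.ofList cs)) := by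
  induction l with
  | nil =>
    intro v hv
    have h0 : ssplit [] ((count + 1 - (v.length : Int)).toNat) = [[]] := by
      cases h : (count + 1 - (v.length : Int)).toNat <;> simp [ssplit]
    rw [List.foldl_nil, h0]
    simp only [List.map_cons, List.map_nil, consHeadS]
    rw [show String.ofList [] = "" from rfl]
    simpa using (dropLast_getLastD v hv).symm
  | cons c rest ih =>
    intro v hv
    have hn : 1 ≤ v.length := List.length_pos_of_ne_nil hv
    rw [List.foldl_cons]
    by_cases hc : c = ' ' ∧ (v.length : Int) ≤ count
    · rw [if_pos hc]
      have hne : v ++ [""] ≠ [] := by simp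
      rw [ih (v ++ [""]) hne]
      have hr : (count + 1 - ((v ++ [""]).length : Int)).toNat + 1
          = (count + 1 - (v.length : Int)).toNat := by
        simp only [List.length_append, List.length_cons, List.length_nil]
        omega
      rw [← hr]
      have hsp : ssplit (c :: rest) ((count + 1 - ((v ++ [""]).length : Int)).toNat + 1)
          = [] :: ssplit rest ((count + 1 - ((v ++ [""]).length : Int)).toNat) := by
        simp [ssplit, hc.1]
      rw [hsp]
      simp only [List.dropLast_concat, List.getLastD_concat, List.map_cons]
      rw [show String.ofList [] = "" from rfl]
      rw [consHeadS_empty _ (by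
        intro h
        exact ssplit_ne_nil rest _ (List.map_eq_nil_iff.mp h))]
      simp only [consHeadS]
      rw [show v.getLastD "" ++ "" = v.getLastD "" by simp]
      set M := (ssplit rest ((count + 1 - ((v ++ [""]).length : Int)).toNat)).map
        (fun cs => String.ofList cs) with hM
      conv_lhs => rw [← dropLast_getLastD v hv]
      rw [List.append_assoc, List.singleton_append]
    · rw [if_neg hc]
      set v' := v.dropLast ++ [v.getLastD "" ++ c.toString] with hv'def
      have hne : v' ≠ [] := by simp [hv'def]
      rw [ih v' hne]
      have hlen : v'.length = v.length := by
        simp only [hv'def, List.length_append, List.length_dropLast, List.length_cons,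
          List.length_nil]
        omega
      have hdl : v'.dropLast = v.dropLast := by simp [hv'def]
      have hgl : v'.getLastD "" = v.getLastD "" ++ c.toString := by simp [hv'def]
      rw [hlen, hdl, hgl]
      rcases hr : (count + 1 - (v.length : Int)).toNat with _ | r
      · -- budget exhausted: both sides are one single flat string
        have h1 : ssplit (c :: rest) 0 = [c :: rest] := by simp [ssplit]
        have h2 : ssplit rest 0 = [rest] := by simp [ssplit]
        rw [h1, h2]
        simp only [List.map_cons, List.map_nil, consHeadS]
        rw [show (String.ofList (c :: rest)) = c.toString ++ String.ofList rest by
          rw [← List.singleton_append, String.ofList_append,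
            show String.ofList [c] = c.toString from rfl]]
        rw [String.append_assoc]
      · -- budget remains, so the test failed because c ≠ ' '
        have hcne : c ≠ ' ' := by
          intro h
          exact hc ⟨h, by omega⟩
        have h1 : ssplit (c :: rest) (r + 1) = consHead [c] (ssplit rest (r + 1)) := by
          simp [ssplit, hcne]
        rw [h1, consHeadS_map_mk]
        rw [show String.ofList [c] = c.toString from rfl]
        rw [consHeadS_consHeadS]

-- the split performed by B is ssplit with budget count.toNat
theorem splitMax_eq_ssplit (str : String) (count : Int) :
    PySem.Str.splitMax? str " " (max count 0)
      = some ((ssplit str.toList count.toNat).map (fun cs => String.ofList cs)) := by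
  have hbridge := PySem.Str.splitMax?_map str " " (max count 0)
  have hsep : (" " : String).toList = [' '] := rfl
  rw [hsep] at hbridge
  have hchars : PySem.Chars.splitMax? str.toList [' '] (max count 0)
      = some (ssplit str.toList count.toNat) := by
    unfold PySem.Chars.splitMax?
    simp only [List.isEmpty_cons, Bool.false_eq_true, if_false]
    congr 1
    unfold PySem.Chars.splitOnMax
    rw [if_neg (by omega)]
    rw [go_eq_ssplit str.toList (str.toList.length + 1) (max count 0).toNat [] []
      (by omega)]
    rw [show (max count 0).toNat = count.toNat by omega]
    simp only [List.reverse_nil, List.nil_append]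
    exact consHead_nil _ (ssplit_ne_nil _ _)
  rw [hchars] at hbridge
  cases h : PySem.Str.splitMax? str " " (max count 0) with
  | none => rw [h] at hbridge; simp at hbridge
  | some xs =>
    rw [h] at hbridge
    simp only [Option.map_some, Option.some.injEq] at hbridge
    congr 1
    calc xs = (xs.map String.toList).map (fun cs => String.ofList cs) := by
            simp [Function.comp_def]
      _ = (ssplit str.toList count.toNat).map (fun cs => String.ofList cs) := by rw [hbridge]

-- ===== VERDICT (by name: the statement is the Claim_ definition above) =====
theorem partstrhead_spec : Claim_equal_partstrhead := by
  intro str count _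
  unfold Spec_partstrhead partstrhead partstrhead_alt re_empty
  rw [splitMax_eq_ssplit]
  simp only [Option.getD_some]
  rw [foldA_eq count str.toList [""] (by simp)]
  rw [show ((count + 1 - (([""] : List String).length : Int)).toNat) = count.toNat by
    simp]
  rw [show ([""] : List String).dropLast = [] from rfl,
    show ([""] : List String).getLastD "" = "" from rfl]
  rw [consHeadS_empty _ (by
    intro h
    exact ssplit_ne_nil str.toList _ (List.map_eq_nil_iff.mp h))]
  simp only [List.nil_append]
  rw [PySem.List.foldl_append_ite_eq_filter, List.nil_append]
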